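-- pv_equiv track=rewrite | github.com/mbteresczuk/cath-hemo | utils/diagram_library.py | _detect_anatomy_type
-- ===== SOURCE A (Python) =====
-- def _detect_anatomy_type(filename: str) -> tuple[str, str]:
--     """Detect anatomy_type and location_set from filename."""
--     name_upper = filename.upper()
--
--     # Fontan variants (check before Glenn since HemiFontan contains neither word but is fontan-like)
--     if any(k in name_upper for k in ["FONTAN", "ECFF", "LTFF", "HEMIFONT"]):
--         return "post_fontan", "post_fontan"
--
--     # Glenn
--     if any(k in name_upper for k in ["GLENN", "BDG"]):
--         return "post_glenn", "post_glenn"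
--
--     # Mustard/Senning atrial switch
--     if any(k in name_upper for k in ["MUSTARD", "SENNING"]):
--         return "post_mustard", "post_mustard_senning"
--
--     # Single ventricle pre-Fontan (Norwood, BTS, shunt stages)
--     if any(k in name_upper for k in [
--         "NORWOOD", "_BTS", "SANO", "RMBTS", "PA_IVS",
--         "PULM ATRESIA", "PULMATRESIA",
--     ]):
--         return "single_ventricle", "single_ventricle_norwood"
--
--     return "biventricle", "standard_biventricle"
-- ===== SOURCE B (Python) =====
-- # Flat keyword -> priority map; result is the table entry of the minimum
-- # priority among all matching keywords (default: last entry, biventricle).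
-- _KEYWORD_PRIORITY = {
--     "FONTAN": 0, "ECFF": 0, "LTFF": 0, "HEMIFONT": 0,
--     "GLENN": 1, "BDG": 1,
--     "MUSTARD": 2, "SENNING": 2,
--     "NORWOOD": 3, "_BTS": 3, "SANO": 3, "RMBTS": 3, "PA_IVS": 3,
--     "PULM ATRESIA": 3, "PULMATRESIA": 3,
-- }
--
-- _RESULTS = [
--     ("post_fontan", "post_fontan"),
--     ("post_glenn", "post_glenn"),
--     ("post_mustard", "post_mustard_senning"),
--     ("single_ventricle", "single_ventricle_norwood"),
--     ("biventricle", "standard_biventricle"),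
-- ]
--
-- def _detect_anatomy_type(filename: str) -> tuple[str, str]:
--     name_upper = filename.upper()
--     best = min((p for k, p in _KEYWORD_PRIORITY.items() if k in name_upper),
--                default=len(_RESULTS) - 1)
--     return _RESULTS[best]
-- ===== Notes on version B (the rewrite author's own statement) =====
-- stated objective: alternative
-- what changed: Instead of checking keyword groups branch by branch with short-circuiting, B scans one flat keyword->priority map, takes the minimum priority among all matching keywords, and indexes a result table (default = last entry); correct because group priority equals the minimum keyword priority.
import Mathlib
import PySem

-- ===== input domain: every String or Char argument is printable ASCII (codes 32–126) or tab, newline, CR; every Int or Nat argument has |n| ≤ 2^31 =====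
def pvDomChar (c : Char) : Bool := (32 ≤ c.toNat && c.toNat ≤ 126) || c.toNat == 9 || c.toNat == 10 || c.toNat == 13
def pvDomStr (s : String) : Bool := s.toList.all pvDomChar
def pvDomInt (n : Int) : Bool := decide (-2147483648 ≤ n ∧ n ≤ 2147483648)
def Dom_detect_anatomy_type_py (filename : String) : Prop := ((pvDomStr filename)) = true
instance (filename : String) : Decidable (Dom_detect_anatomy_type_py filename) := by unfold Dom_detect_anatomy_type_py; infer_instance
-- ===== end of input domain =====

-- ===== PORT A =====
-- B classifies by minimum keyword priority over a flat map instead of A's branch chain (alternative decomposition, same cost).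
def detect_anatomy_type_py (filename : String) : String × String :=
  let name_upper := PySem.Str.upper filename
  if ["FONTAN", "ECFF", "LTFF", "HEMIFONT"].any (fun k => PySem.Str.isIn k name_upper) then
    ("post_fontan", "post_fontan")
  else if ["GLENN", "BDG"].any (fun k => PySem.Str.isIn k name_upper) then
    ("post_glenn", "post_glenn")
  else if ["MUSTARD", "SENNING"].any (fun k => PySem.Str.isIn k name_upper) then
    ("post_mustard", "post_mustard_senning")
  else if ["NORWOOD", "_BTS", "SANO", "RMBTS", "PA_IVS",
           "PULM ATRESIA", "PULMATRESIA"].any (fun k => PySem.Str.isIn k name_upper) then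
    ("single_ventricle", "single_ventricle_norwood")
  else
    ("biventricle", "standard_biventricle")

-- ===== PORT B =====
-- flat keyword -> priority map (Python dict, insertion order)
def keywordPriority : List (String × Nat) :=
  [("FONTAN", 0), ("ECFF", 0), ("LTFF", 0), ("HEMIFONT", 0),
   ("GLENN", 1), ("BDG", 1),
   ("MUSTARD", 2), ("SENNING", 2),
   ("NORWOOD", 3), ("_BTS", 3), ("SANO", 3), ("RMBTS", 3), ("PA_IVS", 3),
   ("PULM ATRESIA", 3), ("PULMATRESIA", 3)]

def anatomyResults : List (String × String) :=
  [("post_fontan", "post_fontan"),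
   ("post_glenn", "post_glenn"),
   ("post_mustard", "post_mustard_senning"),
   ("single_ventricle", "single_ventricle_norwood"),
   ("biventricle", "standard_biventricle")]

def detect_anatomy_type_py_alt (filename : String) : String × String :=
  let name_upper := PySem.Str.upper filename
  -- min over the priorities of all matching keywords, default = len(_RESULTS) - 1
  let best :=
    match ((keywordPriority.filter (fun kp => PySem.Str.isIn kp.1 name_upper)).map Prod.snd).min? with
    | some p => p
    | none => anatomyResults.length - 1
  anatomyResults.getD best ("biventricle", "standard_biventricle")

-- ===== PRECONDITION & SPEC =====
def Spec_detect_anatomy_type_py (filename : String) (out : String × String) : Prop := out = detect_anatomy_type_py_alt filename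
instance (filename : String) (out : String × String) : Decidable (Spec_detect_anatomy_type_py filename out) := by unfold Spec_detect_anatomy_type_py; infer_instance

-- ===== CLAIM (what is proved, stated in full; the proofs are below) =====
def Claim_equal_detect_anatomy_type_py : Prop := ∀ (filename : String), Dom_detect_anatomy_type_py filename → Spec_detect_anatomy_type_py filename (detect_anatomy_type_py filename)

-- ===== LEMMAS AND PROOFS =====

-- the four priority groups; keywordPriority is their concatenation (by rfl)
def grp1 : List (String × Nat) := [("FONTAN", 0), ("ECFF", 0), ("LTFF", 0), ("HEMIFONT", 0)]
def grp2 : List (String × Nat) := [("GLENN", 1), ("BDG", 1)]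
def grp3 : List (String × Nat) := [("MUSTARD", 2), ("SENNING", 2)]
def grp4 : List (String × Nat) := [("NORWOOD", 3), ("_BTS", 3), ("SANO", 3), ("RMBTS", 3),
                                   ("PA_IVS", 3), ("PULM ATRESIA", 3), ("PULMATRESIA", 3)]

theorem keywordPriority_decomp : keywordPriority = grp1 ++ grp2 ++ grp3 ++ grp4 := rfl

theorem foldl_min_eq (a : Nat) (l : List Nat) (h : ∀ x ∈ l, a ≤ x) :
    l.foldl Nat.min a = a := by
  induction l generalizing a with
  | nil => rfl
  | cons x t ih =>
    have hax : a ≤ x := h x (by simp)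
    simp only [List.foldl_cons, Nat.min_eq_left hax]
    exact ih a (fun y hy => h y (by simp [hy]))

theorem min?_replicate_append (n a : Nat) (l : List Nat) (h : ∀ x ∈ l, a ≤ x) :
    (List.replicate n a ++ l).min? = if n = 0 then l.min? else some a := by
  cases n with
  | zero => simp
  | succ m =>
    simp only [List.replicate_succ, List.cons_append, Nat.succ_ne_zero, if_false]
    show some ((List.replicate m a ++ l).foldl Nat.min a) = some a
    congr 1
    apply foldl_min_eq
    intro x hx
    rcases List.mem_append.mp hx with h1 | h2
    · exact le_of_eq (List.eq_of_mem_replicate h1).symm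
    · exact h x h2

theorem min?_replicate (n a : Nat) :
    (List.replicate n a).min? = if n = 0 then none else some a := by
  have := min?_replicate_append n a [] (by intro x hx; simp at hx)
  simpa using this

theorem map_snd_filter_const (p : String × Nat → Bool) (c : Nat) (g : List (String × Nat))
    (h : ∀ x ∈ g, x.2 = c) :
    ((g.filter p).map Prod.snd) = List.replicate ((g.filter p).length) c := by
  have := List.eq_replicate_of_mem (a := c) (l := (g.filter p).map Prod.snd)
    (by intro b hb
        rcases List.mem_map.mp hb with ⟨x, hx, rfl⟩
        exact h x (List.mem_of_mem_filter hx))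
  simpa using this

theorem filter_len_zero_iff_not_any (p : String × Nat → Bool) (g : List (String × Nat)) :
    ((g.filter p).length = 0) ↔ g.any p = false := by
  simp [List.length_eq_zero_iff, List.filter_eq_nil_iff, List.any_eq_false]

-- the minimum-priority value as a nested if on the four group "any" booleans
theorem best_characterization (u : String) :
    (match ((keywordPriority.filter (fun kp => PySem.Str.isIn kp.1 u)).map Prod.snd).min? with
     | some p => p
     | none => anatomyResults.length - 1)
    = (if grp1.any (fun kp => PySem.Str.isIn kp.1 u) then 0
       else if grp2.any (fun kp => PySem.Str.isIn kp.1 u) then 1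
       else if grp3.any (fun kp => PySem.Str.isIn kp.1 u) then 2
       else if grp4.any (fun kp => PySem.Str.isIn kp.1 u) then 3
       else 4) := by
  set p : String × Nat → Bool := fun kp => PySem.Str.isIn kp.1 u with hp
  have h1 : ((grp1.filter p).map Prod.snd) = List.replicate ((grp1.filter p).length) 0 :=
    map_snd_filter_const p 0 grp1 (by intro x hx; simp [grp1] at hx; rcases hx with h|h|h|h <;> simp [h])
  have h2 : ((grp2.filter p).map Prod.snd) = List.replicate ((grp2.filter p).length) 1 :=
    map_snd_filter_const p 1 grp2 (by intro x hx; simp [grp2] at hx; rcases hx with h|h <;> simp [h])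
  have h3 : ((grp3.filter p).map Prod.snd) = List.replicate ((grp3.filter p).length) 2 :=
    map_snd_filter_const p 2 grp3 (by intro x hx; simp [grp3] at hx; rcases hx with h|h <;> simp [h])
  have h4 : ((grp4.filter p).map Prod.snd) = List.replicate ((grp4.filter p).length) 3 :=
    map_snd_filter_const p 3 grp4
      (by intro x hx; simp [grp4] at hx; rcases hx with h|h|h|h|h|h|h <;> simp [h])
  rw [keywordPriority_decomp]
  simp only [List.filter_append, List.map_append, h1, h2, h3, h4]
  rw [List.append_assoc, List.append_assoc]
  rw [min?_replicate_append ((grp1.filter p).length) 0 _ (by intro x hx; exact Nat.zero_le x)]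
  rw [min?_replicate_append ((grp2.filter p).length) 1 _ (by
    intro x hx
    rcases List.mem_append.mp hx with hmem | hmem
    · have := List.eq_of_mem_replicate hmem; omega
    · have := List.eq_of_mem_replicate hmem; omega)]
  rw [min?_replicate_append ((grp3.filter p).length) 2 _ (by
    intro x hx
    have := List.eq_of_mem_replicate hx; omega)]
  rw [min?_replicate ((grp4.filter p).length) 3]
  by_cases g1 : grp1.any p = true
  · have : ¬ ((grp1.filter p).length = 0) := by
      rw [filter_len_zero_iff_not_any]; simp [g1]
    simp [this, g1]
  · have e1 : (grp1.filter p).length = 0 := by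
      rw [filter_len_zero_iff_not_any]; simpa using g1
    by_cases g2 : grp2.any p = true
    · have : ¬ ((grp2.filter p).length = 0) := by
        rw [filter_len_zero_iff_not_any]; simp [g2]
      simp [e1, this, g1, g2]
    · have e2 : (grp2.filter p).length = 0 := by
        rw [filter_len_zero_iff_not_any]; simpa using g2
      by_cases g3 : grp3.any p = true
      · have : ¬ ((grp3.filter p).length = 0) := by
          rw [filter_len_zero_iff_not_any]; simp [g3]
        simp [e1, e2, this, g1, g2, g3]
      · have e3 : (grp3.filter p).length = 0 := by
          rw [filter_len_zero_iff_not_any]; simpa using g3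
        by_cases g4 : grp4.any p = true
        · have : ¬ ((grp4.filter p).length = 0) := by
            rw [filter_len_zero_iff_not_any]; simp [g4]
          simp [e1, e2, e3, this, g1, g2, g3, g4]
        · have e4 : (grp4.filter p).length = 0 := by
            rw [filter_len_zero_iff_not_any]; simpa using g4
          simp [e1, e2, e3, e4, g1, g2, g3, g4, anatomyResults]

-- ===== VERDICT (by name: the statement is the Claim_ definition above) =====
theorem detect_anatomy_type_py_spec : Claim_equal_detect_anatomy_type_py := by
  intro filename _
  unfold Spec_detect_anatomy_type_py detect_anatomy_type_py detect_anatomy_type_py_alt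
  simp only [best_characterization (PySem.Str.upper filename)]
  by_cases g1 : grp1.any (fun kp => PySem.Str.isIn kp.1 (PySem.Str.upper filename)) = true <;>
    by_cases g2 : grp2.any (fun kp => PySem.Str.isIn kp.1 (PySem.Str.upper filename)) = true <;>
    by_cases g3 : grp3.any (fun kp => PySem.Str.isIn kp.1 (PySem.Str.upper filename)) = true <;>
    by_cases g4 : grp4.any (fun kp => PySem.Str.isIn kp.1 (PySem.Str.upper filename)) = true <;>
    simp_all [grp1, grp2, grp3, grp4, anatomyResults]
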